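-- pv_equiv track=rewrite | github.com/smartman1234/speechsuper-api-samples | http_samples/python_http_sample/ops.py | ctc_decode_stream
-- ===== SOURCE A (Python) =====
-- def ctc_decode_stream(tokens):
--     i = 0
--     while i < len(tokens):
--         while i+1 < len(tokens) and tokens[i] == tokens[i+1]:
--             i += 1
--         if i+1 == len(tokens) and tokens[i] != -1:
--             return tokens[0], []
--         if tokens[i] != -1:
--             return tokens[i], tokens[i+1:]
--         i += 1
--     return -1, []
-- ===== SOURCE B (Python) =====
-- def ctc_decode_stream(tokens):
--     # Stage 1: run-length encode the whole input as (value, end_index) pairs.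
--     runs = []
--     pos = 0
--     for t in tokens:
--         pos += 1
--         if runs and runs[-1][0] == t:
--             runs[-1] = (t, pos)
--         else:
--             runs.append((t, pos))
--     # Stage 2: scan the runs for the first non-blank one.
--     for v, end in runs:
--         if v != -1:
--             if end == len(tokens):
--                 return tokens[0], []
--             return v, tokens[end:]
--     return -1, []
-- ===== Notes on version B (the rewrite author's own statement) =====
-- stated objective: alternative
-- what changed: Replaces A's nested index-walking while-loops with a staged two-pass algorithm: first build a complete run-length encoding of the input as (value, end_index) pairs, then scan that intermediate structure for the first non-blank run.
import Mathlib
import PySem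

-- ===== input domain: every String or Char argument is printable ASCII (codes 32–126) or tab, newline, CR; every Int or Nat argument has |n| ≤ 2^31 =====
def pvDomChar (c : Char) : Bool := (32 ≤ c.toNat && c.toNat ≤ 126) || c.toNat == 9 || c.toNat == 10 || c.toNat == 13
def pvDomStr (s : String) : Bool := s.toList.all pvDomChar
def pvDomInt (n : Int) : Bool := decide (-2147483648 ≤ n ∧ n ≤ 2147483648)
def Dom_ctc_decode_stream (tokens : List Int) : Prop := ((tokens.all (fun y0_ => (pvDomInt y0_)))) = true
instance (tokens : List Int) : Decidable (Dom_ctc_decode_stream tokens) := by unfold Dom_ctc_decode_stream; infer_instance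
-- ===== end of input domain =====

-- B replaces A's nested index-walking while-loops by a staged two-pass algorithm:
-- build a full run-length encoding first, then scan it — objective: alternative.

-- ===== PORT A =====
-- inner while: 'while i+1 < len(tokens) and tokens[i] == tokens[i+1]: i += 1'
def ctcInner (tokens : List Int) (i : Nat) : Nat :=
  if i + 1 < tokens.length ∧ tokens.getD i 0 = tokens.getD (i+1) 0 then
    ctcInner tokens (i+1)
  else i
termination_by tokens.length - i
decreasing_by omega

theorem ctcInner_ge (tokens : List Int) (i : Nat) : i ≤ ctcInner tokens i := by
  fun_induction ctcInner tokens i with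
  | case1 i h ih => omega
  | case2 i h => omega

-- outer while over i (tokens[i] accessed only in range, ported as getD)
def ctcLoop (tokens : List Int) (i : Nat) : Int × List Int :=
  if i < tokens.length then
    let j := ctcInner tokens i
    if j + 1 = tokens.length ∧ tokens.getD j 0 ≠ -1 then (tokens.getD 0 0, [])
    else if tokens.getD j 0 ≠ -1 then (tokens.getD j 0, tokens.drop (j+1))
    else ctcLoop tokens (j+1)
  else (-1, [])
termination_by tokens.length - i
decreasing_by have := ctcInner_ge tokens i; omega

def ctc_decode_stream (tokens : List Int) : Int × List Int := ctcLoop tokens 0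

-- ===== PORT B =====
-- loop body of stage 1: state is (runs, pos); 'runs[-1] = …' is dropLast ++ [·]
def runStep (st : List (Int × Nat) × Nat) (t : Int) : List (Int × Nat) × Nat :=
  let pos := st.2 + 1
  let runs := st.1
  match runs.getLast? with
  | some (v, _) => if v = t then (runs.dropLast ++ [(t, pos)], pos)
                   else (runs ++ [(t, pos)], pos)
  | none => ([(t, pos)], pos)

-- stage 2: scan the runs for the first non-blank one
def scanRuns (tokens : List Int) : List (Int × Nat) → Int × List Int
  | [] => (-1, [])
  | (v, e) :: rest =>
    if v ≠ -1 then
      if e = tokens.length then (tokens.getD 0 0, [])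
      else (v, tokens.drop e)
    else scanRuns tokens rest

def ctc_decode_stream_alt (tokens : List Int) : Int × List Int :=
  scanRuns tokens (tokens.foldl runStep ([], 0)).1

-- ===== PRECONDITION & SPEC =====
def Spec_ctc_decode_stream (tokens : List Int) (out : Int × List Int) : Prop := out = ctc_decode_stream_alt tokens
instance (tokens : List Int) (out : Int × List Int) : Decidable (Spec_ctc_decode_stream tokens out) := by unfold Spec_ctc_decode_stream; infer_instance

-- ===== CLAIM (what is proved, stated in full; the proofs are below) =====
def Claim_equal_ctc_decode_stream : Prop := ∀ (tokens : List Int), Dom_ctc_decode_stream tokens → Spec_ctc_decode_stream tokens (ctc_decode_stream tokens)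

-- ===== LEMMAS AND PROOFS =====
-- functional characterisation of stage 1: run-length encoding by front recursion
def runsOf (pos : Nat) : List Int → List (Int × Nat)
  | [] => []
  | t :: rest =>
    match runsOf (pos+1) rest with
    | (v, e) :: tail => if v = t then (t, e) :: tail else (t, pos+1) :: (v, e) :: tail
    | [] => [(t, pos+1)]

-- merging one run in front of a run list
def glue (v : Int) (e : Nat) : List (Int × Nat) → List (Int × Nat)
  | (w, f) :: tail => if w = v then (v, f) :: tail else (v, e) :: (w, f) :: tail
  | [] => [(v, e)]

theorem glue_head (v : Int) (e : Nat) (R : List (Int × Nat)) :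
    ∃ f tl, glue v e R = (v, f) :: tl := by
  match R with
  | [] => exact ⟨e, [], rfl⟩
  | (w, f) :: tail =>
    by_cases h : w = v
    · exact ⟨f, tail, by simp [glue, h]⟩
    · exact ⟨e, (w, f) :: tail, by simp [glue, h]⟩

theorem runsOf_cons (pos : Nat) (t : Int) (rest : List Int) :
    runsOf pos (t :: rest) = glue t (pos+1) (runsOf (pos+1) rest) := by
  simp only [runsOf]
  match h : runsOf (pos+1) rest with
  | [] => rfl
  | (v, e) :: tail =>
    by_cases hv : v = t
    · subst hv; simp [glue]
    · simp [glue, hv]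

theorem foldl_runs (ts : List Int) (rs : List (Int × Nat)) (pos : Nat) (v : Int) (e : Nat) :
    (ts.foldl runStep (rs ++ [(v, e)], pos)).1 = rs ++ glue v e (runsOf pos ts) := by
  induction ts generalizing rs pos v e with
  | nil => simp [runsOf, glue]
  | cons t rest ih =>
    rw [List.foldl_cons]
    have hstep : runStep (rs ++ [(v, e)], pos) t =
        if v = t then (rs ++ [(t, pos+1)], pos+1)
        else ((rs ++ [(v, e)]) ++ [(t, pos+1)], pos+1) := by
      simp [runStep]
    rw [hstep, runsOf_cons]
    by_cases hv : v = t
    · rw [if_pos hv, ih]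
      obtain ⟨f, tl, hg⟩ := glue_head t (pos+1) (runsOf (pos+1) rest)
      rw [hg]
      subst hv
      simp [glue]
    · rw [if_neg hv, ih]
      obtain ⟨f, tl, hg⟩ := glue_head t (pos+1) (runsOf (pos+1) rest)
      rw [hg]
      simp [glue, Ne.symm hv]

theorem foldl_runs_nil (ts : List Int) :
    (ts.foldl runStep ([], 0)).1 = runsOf 0 ts := by
  match ts with
  | [] => rfl
  | t :: rest =>
    rw [List.foldl_cons]
    have hstep : runStep ([], 0) t = (([] : List (Int × Nat)) ++ [(t, 1)], 1) := by
      simp [runStep]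
    rw [hstep, foldl_runs, runsOf_cons]
    rfl

theorem ctcInner_getD (tokens : List Int) (i : Nat) :
    tokens.getD (ctcInner tokens i) 0 = tokens.getD i 0 := by
  fun_induction ctcInner tokens i with
  | case1 i hc ih => rw [ih, ← hc.2]
  | case2 i hc => rfl

theorem runsOf_head (tokens : List Int) (p : Nat) (h : p < tokens.length) :
    ∃ e tl, runsOf p (tokens.drop p) = (tokens.getD p 0, e) :: tl := by
  rw [List.drop_eq_getElem_cons h, runsOf_cons]
  have : tokens[p] = tokens.getD p 0 := (List.getD_eq_getElem tokens 0 h).symm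
  rw [this]
  exact glue_head _ _ _

theorem runsOf_drop (tokens : List Int) (i : Nat) (h : i < tokens.length) :
    runsOf i (tokens.drop i) =
      (tokens.getD i 0, ctcInner tokens i + 1) ::
        runsOf (ctcInner tokens i + 1) (tokens.drop (ctcInner tokens i + 1)) := by
  fun_induction ctcInner tokens i with
  | case1 i hc ih =>
    have h1 : i < tokens.length := by omega
    rw [List.drop_eq_getElem_cons h1, runsOf_cons, ih hc.1]
    have hg : tokens.getD (i+1) 0 = tokens[i] := by
      rw [← hc.2]; exact List.getD_eq_getElem tokens 0 h1
    rw [hg]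
    simp [glue]
    exact (List.getD_eq_getElem tokens 0 h1).symm
  | case2 i hc =>
    rw [List.drop_eq_getElem_cons h, runsOf_cons]
    have hgi : tokens.getD i 0 = tokens[i] := List.getD_eq_getElem tokens 0 h
    rcases Nat.lt_or_ge (i+1) tokens.length with h2 | h2
    · obtain ⟨e, tl, he⟩ := runsOf_head tokens (i+1) h2
      rw [he]
      have hne : tokens.getD (i+1) 0 ≠ tokens[i] := by
        intro heq
        exact hc ⟨h2, by rw [hgi, heq]⟩
      simp only [glue]
      rw [if_neg hne, hgi]
    · have hd : tokens.drop (i+1) = [] := List.drop_eq_nil_of_le h2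
      rw [hd]
      simp only [runsOf, glue]
      rw [hgi]

theorem scan_loop (tokens : List Int) (i : Nat) :
    scanRuns tokens (runsOf i (tokens.drop i)) = ctcLoop tokens i := by
  fun_induction ctcLoop tokens i with
  | case1 i h j h1 =>
    rw [runsOf_drop tokens i h]
    have hv : tokens.getD i 0 ≠ -1 := by rw [← ctcInner_getD tokens i]; exact h1.2
    simp only [scanRuns]
    rw [if_pos hv, if_pos h1.1]
  | case2 i h j h1 h2 =>
    rw [runsOf_drop tokens i h]
    have hv : tokens.getD i 0 ≠ -1 := by rw [← ctcInner_getD tokens i]; exact h2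
    have hne : ctcInner tokens i + 1 ≠ tokens.length := by
      intro heq; exact h1 ⟨heq, h2⟩
    simp only [scanRuns]
    rw [if_pos hv, if_neg hne, ctcInner_getD tokens i]
  | case3 i h j h1 h2 ih =>
    rw [runsOf_drop tokens i h]
    have hv : tokens.getD i 0 = -1 := by
      rw [← ctcInner_getD tokens i]
      by_contra hne
      exact h2 hne
    simp only [scanRuns]
    rw [if_neg (by simp only [ne_eq, not_not]; exact hv)]
    exact ih
  | case4 i h =>
    have hd : tokens.drop i = [] := List.drop_eq_nil_of_le (by omega)
    rw [hd]
    rfl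

-- ===== VERDICT (by name: the statement is the Claim_ definition above) =====
theorem ctc_decode_stream_spec : Claim_equal_ctc_decode_stream := by
  intro tokens _
  unfold Spec_ctc_decode_stream ctc_decode_stream ctc_decode_stream_alt
  rw [foldl_runs_nil]
  have h0 := scan_loop tokens 0
  rw [List.drop_zero] at h0
  rw [h0]
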